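-- pv_equiv track=rewrite | github.com/CasonL/PitchIQ | app/services/sam_conversation_service.py | _reconstruct_user_responses
-- ===== SOURCE A (Python) =====
-- from typing import Dict, List, Tuple, Optional, Any
--
-- def _reconstruct_user_responses(conversation: List[str], message_roles: List[str]) -> List[str]:
--     """
--     Reconstruct complete user responses by merging adjacent user messages.
--
--     Args:
--         conversation: List of conversation messages
--         message_roles: List of roles for each message
--
--     Returns:
--         List of complete user responses
--     """
--     complete_user_responses = []
--     current_response = []
--
--     for i, (msg, role) in enumerate(zip(conversation, message_roles)):
--         if not msg.strip() or role == 'unknown':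
--             continue
--
--         if role == 'user':
--             # Check if this is a continuation of previous message
--             if i > 0 and message_roles[i-1] == 'user':
--                 # If previous message doesn't end with punctuation, likely continuation
--                 prev_msg = conversation[i-1].strip()
--                 if prev_msg and not prev_msg[-1] in '.!?':
--                     current_response.append(msg.strip())
--                 else:
--                     # Previous message had ending punctuation, might be new thought
--                     # Check if this message starts with lowercase (likely continuation)
--                     if msg.strip() and msg.strip()[0].islower():
--                         current_response.append(msg.strip())
--                     else:
--                         # Likely new thought
--                         if current_response:
--                             complete_user_responses.append(' '.join(current_response))
--                         current_response = [msg.strip()]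
--             else:
--                 # First user message or after Sam's message
--                 if current_response:
--                     complete_user_responses.append(' '.join(current_response))
--                 current_response = [msg.strip()]
--         else:
--             # Sam's message - finalize any pending user response
--             if current_response:
--                 complete_user_responses.append(' '.join(current_response))
--                 current_response = []
--
--     # Add final response if exists
--     if current_response:
--         complete_user_responses.append(' '.join(current_response))
--
--     return complete_user_responses
-- ===== SOURCE B (Python) =====
-- def _reconstruct_user_responses(conversation, message_roles):
--     n = min(len(conversation), len(message_roles))
--
--     def glue(i, m):
--         # does the stripped user message m at index i glue onto message i-1?
--         if i == 0 or message_roles[i - 1] != 'user':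
--             return False
--         prev = conversation[i - 1].strip()
--         if prev and prev[-1] not in '.!?':
--             return True
--         return m[0].islower()
--
--     out = []
--     i = 0
--     while i < n:
--         m = conversation[i].strip()
--         r = message_roles[i]
--         if not m or r == 'unknown' or r != 'user':
--             i += 1
--             continue
--         # a group starts here: greedily consume its continuations forward
--         parts = [m]
--         i += 1
--         while i < n:
--             m = conversation[i].strip()
--             r = message_roles[i]
--             if not m or r == 'unknown':
--                 i += 1
--             elif r != 'user':
--                 i += 1
--                 break
--             elif glue(i, m):
--                 parts.append(m)
--                 i += 1
--             else:
--                 break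
--         out.append(' '.join(parts))
--     return out
-- ===== Notes on version B (the rewrite author's own statement) =====
-- stated objective: alternative
-- what changed: B replaces A's single item-at-a-time loop with cross-iteration pending-group state by a greedy group-at-a-time scan: an outer loop finds each group's first message, an inner loop consumes that group's continuations forward (a glue predicate on the raw previous index), and the joined group is emitted immediately, so no pending accumulator survives between outer iterations.
import Mathlib
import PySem

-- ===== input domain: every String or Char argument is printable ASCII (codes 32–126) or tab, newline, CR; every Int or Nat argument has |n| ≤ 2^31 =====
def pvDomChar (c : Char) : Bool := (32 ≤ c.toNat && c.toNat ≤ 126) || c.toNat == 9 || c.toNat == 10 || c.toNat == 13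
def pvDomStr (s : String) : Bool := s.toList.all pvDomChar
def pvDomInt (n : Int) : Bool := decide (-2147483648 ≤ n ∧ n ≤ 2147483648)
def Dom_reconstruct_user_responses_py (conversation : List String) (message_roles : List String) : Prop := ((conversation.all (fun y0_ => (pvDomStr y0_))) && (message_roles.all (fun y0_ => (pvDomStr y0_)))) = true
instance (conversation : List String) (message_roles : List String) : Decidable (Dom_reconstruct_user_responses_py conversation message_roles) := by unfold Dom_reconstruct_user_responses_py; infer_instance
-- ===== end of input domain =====

set_option maxHeartbeats 1000000


-- B replaces A's single item-at-a-time accumulator loop by a greedy group-at-a-time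
-- scan (outer loop finds a group start, inner loop consumes its continuations, the
-- joined group is emitted immediately); objective: alternative decomposition, same cost.

-- ===== PORT A =====
-- the final "if current_response: complete_user_responses.append(' '.join(current_response))"
def pvFinish (r : List String × List String) : List String :=
  if r.2 ≠ [] then r.1 ++ [PySem.Str.join " " r.2] else r.1

-- the body of A's for-loop, one step of the fold (st = (complete_user_responses, current_response))
def pvStepA (conversation : List String) (message_roles : List String)
    (st : List String × List String) (p : Int × (String × String)) : List String × List String :=
  if PySem.Str.strip p.2.1 = "" ∨ p.2.2 = "unknown" then st
  else if p.2.2 = "user" then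
    if 0 < p.1 ∧ PySem.List.pyGetD message_roles (p.1 - 1) "" = "user" then
      -- prev_msg = conversation[i-1].strip(), inlined
      if PySem.Str.strip (PySem.List.pyGetD conversation (p.1 - 1) "") ≠ "" ∧
         ¬ ((PySem.Str.pyGet? (PySem.Str.strip (PySem.List.pyGetD conversation (p.1 - 1) "")) (-1)).elim false
              (fun c => c == '.' || c == '!' || c == '?')) = true then
        (st.1, st.2 ++ [PySem.Str.strip p.2.1])
      else
        if PySem.Str.strip p.2.1 ≠ "" ∧
           ((PySem.Str.pyGet? (PySem.Str.strip p.2.1) 0).elim false PySem.Chars.islower) = true then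
          (st.1, st.2 ++ [PySem.Str.strip p.2.1])
        else
          ((if st.2 ≠ [] then st.1 ++ [PySem.Str.join " " st.2] else st.1), [PySem.Str.strip p.2.1])
    else
      ((if st.2 ≠ [] then st.1 ++ [PySem.Str.join " " st.2] else st.1), [PySem.Str.strip p.2.1])
  else
    if st.2 ≠ [] then (st.1 ++ [PySem.Str.join " " st.2], []) else st

def reconstruct_user_responses_py (conversation : List String) (message_roles : List String) : List String :=
  pvFinish ((PySem.List.enumerate (conversation.zip message_roles) 0).foldl
    (pvStepA conversation message_roles) ([], []))

-- ===== PORT B =====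
-- B's helper glue(i, m): does the stripped user message m at index i glue onto message i-1?
-- (indices i-1 are always in range when the guard 0 < i holds, so pyGetD's default is never used)
def pvGlue (conversation : List String) (message_roles : List String) (i : Nat) (m : String) : Bool :=
  if 0 < i ∧ PySem.List.pyGetD message_roles ((i : Int) - 1) "" = "user" then
    if PySem.Str.strip (PySem.List.pyGetD conversation ((i : Int) - 1) "") ≠ "" ∧
       ¬ ((PySem.Str.pyGet? (PySem.Str.strip (PySem.List.pyGetD conversation ((i : Int) - 1) "")) (-1)).elim false
            (fun c => c == '.' || c == '!' || c == '?')) = true then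
      true
    else
      (PySem.Str.pyGet? m 0).elim false PySem.Chars.islower
  else false

-- B's inner while loop: starting at index i, consume the continuations of the current
-- group `parts`; returns (index to resume the outer loop at, completed group).
-- fuel is the loop variant n - i, making the recursion structural; any fuel ≥ n - i works.
def pvConsume (c ro : List String) (n : Nat) : Nat → Nat → List String → Nat × List String
  | 0, i, parts => (i, parts)
  | fuel + 1, i, parts =>
    if i < n then
      let m := PySem.Str.strip (c.getD i "")
      let r := ro.getD i ""
      if m = "" ∨ r = "unknown" then pvConsume c ro n fuel (i + 1) parts
      else if r ≠ "user" then (i + 1, parts)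
      else if pvGlue c ro i m = true then pvConsume c ro n fuel (i + 1) (parts ++ [m])
      else (i, parts)
    else (i, parts)

-- B's outer while loop: find the next group start, consume the group, emit it.
def pvOuter (c ro : List String) (n : Nat) : Nat → Nat → List String → List String
  | 0, _, out => out
  | fuel + 1, i, out =>
    if i < n then
      let m := PySem.Str.strip (c.getD i "")
      let r := ro.getD i ""
      if m = "" ∨ r = "unknown" ∨ r ≠ "user" then pvOuter c ro n fuel (i + 1) out
      else
        let p := pvConsume c ro n fuel (i + 1) [m]
        pvOuter c ro n fuel p.1 (out ++ [PySem.Str.join " " p.2])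
    else out

def reconstruct_user_responses_py_alt (conversation : List String) (message_roles : List String) : List String :=
  pvOuter conversation message_roles (min conversation.length message_roles.length)
    (min conversation.length message_roles.length) 0 []

-- ===== PRECONDITION & SPEC =====
def Spec_reconstruct_user_responses_py (conversation : List String) (message_roles : List String) (out : List String) : Prop := out = reconstruct_user_responses_py_alt conversation message_roles
instance (conversation : List String) (message_roles : List String) (out : List String) : Decidable (Spec_reconstruct_user_responses_py conversation message_roles out) := by unfold Spec_reconstruct_user_responses_py; infer_instance

-- ===== CLAIM (what is proved, stated in full; the proofs are below) =====
def Claim_equal_reconstruct_user_responses_py : Prop := ∀ (conversation : List String) (message_roles : List String), Dom_reconstruct_user_responses_py conversation message_roles → Spec_reconstruct_user_responses_py conversation message_roles (reconstruct_user_responses_py conversation message_roles)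

-- ===== LEMMAS AND PROOFS =====

-- one-step unfoldings of B's loops
lemma pvConsume_pos (c ro : List String) (n k i : Nat) (parts : List String) (h : i < n) :
    pvConsume c ro n (k + 1) i parts =
      (if PySem.Str.strip (c.getD i "") = "" ∨ ro.getD i "" = "unknown" then
        pvConsume c ro n k (i + 1) parts
       else if ro.getD i "" ≠ "user" then (i + 1, parts)
       else if pvGlue c ro i (PySem.Str.strip (c.getD i "")) = true then
        pvConsume c ro n k (i + 1) (parts ++ [PySem.Str.strip (c.getD i "")])
       else (i, parts)) := by
  rw [pvConsume]; simp only [if_pos h]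

lemma pvConsume_neg (c ro : List String) (n k i : Nat) (parts : List String) (h : ¬ i < n) :
    pvConsume c ro n k i parts = (i, parts) := by
  cases k with
  | zero => rfl
  | succ k => rw [pvConsume]; simp only [if_neg h]

lemma pvOuter_pos (c ro : List String) (n k i : Nat) (out : List String) (h : i < n) :
    pvOuter c ro n (k + 1) i out =
      (if PySem.Str.strip (c.getD i "") = "" ∨ ro.getD i "" = "unknown" ∨ ro.getD i "" ≠ "user" then
        pvOuter c ro n k (i + 1) out
       else
        pvOuter c ro n k (pvConsume c ro n k (i + 1) [PySem.Str.strip (c.getD i "")]).1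
          (out ++ [PySem.Str.join " " (pvConsume c ro n k (i + 1) [PySem.Str.strip (c.getD i "")]).2])) := by
  rw [pvOuter]; simp only [if_pos h]

lemma pvOuter_neg (c ro : List String) (n k i : Nat) (out : List String) (h : ¬ i < n) :
    pvOuter c ro n k i out = out := by
  cases k with
  | zero => rfl
  | succ k => rw [pvOuter]; simp only [if_neg h]

-- A's step on a skipped message leaves the state unchanged
lemma stepA_skip (c ro : List String) (st : List String × List String) (j : Int) (m r : String)
    (h : PySem.Str.strip m = "" ∨ r = "unknown") :
    pvStepA c ro st (j, (m, r)) = st := by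
  unfold pvStepA; simp [h]

-- A's step on a surviving user message: glue onto the pending group or flush and restart —
-- exactly B's glue predicate (at p.1 = (i : Nat), as every enumerate index is)
lemma stepA_user (c ro : List String) (st : List String × List String) (i : Nat) (m r : String)
    (hm : ¬ PySem.Str.strip m = "") (hr : r = "user") :
    pvStepA c ro st ((i : Int), (m, r)) =
      (if pvGlue c ro i (PySem.Str.strip m) = true then (st.1, st.2 ++ [PySem.Str.strip m])
       else ((if st.2 ≠ [] then st.1 ++ [PySem.Str.join " " st.2] else st.1), [PySem.Str.strip m])) := by
  have hcast : (0 : Int) < (i : Int) ↔ 0 < i := by exact_mod_cast Iff.rfl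
  unfold pvStepA pvGlue
  split_ifs <;> simp_all

-- with an empty pending group, glue and new-thought coincide
lemma stepA_user_nil (c ro : List String) (out : List String) (i : Nat) (m r : String)
    (hm : ¬ PySem.Str.strip m = "") (hr : r = "user") :
    pvStepA c ro (out, []) ((i : Int), (m, r)) = (out, [PySem.Str.strip m]) := by
  rw [stepA_user c ro (out, []) i m r hm hr]; split <;> simp

-- A's step on a Sam message flushes the pending group
lemma stepA_sam (c ro : List String) (st : List String × List String) (j : Int) (m r : String)
    (hm : ¬ PySem.Str.strip m = "") (hu : r ≠ "unknown") (hr : r ≠ "user") :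
    pvStepA c ro st (j, (m, r)) =
      (if st.2 ≠ [] then (st.1 ++ [PySem.Str.join " " st.2], []) else st) := by
  unfold pvStepA; simp [hm, hu, hr]

-- the resume index never moves backwards
lemma pvConsume_ge (c ro : List String) (n : Nat) :
    ∀ (k i : Nat) (parts : List String), i ≤ (pvConsume c ro n k i parts).1 := by
  intro k
  induction k with
  | zero => intro i parts; exact le_refl i
  | succ k ih =>
    intro i parts
    by_cases h : i < n
    · rw [pvConsume_pos _ _ _ _ _ _ h]
      split_ifs with h1 h2 h3
      · exact le_trans (by omega) (ih (i + 1) parts)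
      · omega
      · exact le_trans (by omega) (ih (i + 1) _)
      · exact le_refl i
    · rw [pvConsume_neg _ _ _ _ _ _ h]

-- any fuel of at least n - i computes the same result
lemma pvConsume_fuel (c ro : List String) (n : Nat) :
    ∀ (k k' i : Nat) (parts : List String), n - i ≤ k → n - i ≤ k' →
      pvConsume c ro n k i parts = pvConsume c ro n k' i parts := by
  intro k
  induction k with
  | zero =>
    intro k' i parts hk hk'
    have h : ¬ i < n := by omega
    rw [pvConsume_neg _ _ _ _ _ _ h, pvConsume_neg _ _ _ _ _ _ h]
  | succ k ih =>
    intro k' i parts hk hk'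
    by_cases h : i < n
    · obtain ⟨k'', rfl⟩ : ∃ k'', k' = k'' + 1 := ⟨k' - 1, by omega⟩
      rw [pvConsume_pos _ _ _ _ _ _ h, pvConsume_pos _ _ _ _ _ _ h]
      split_ifs with h1 h2 h3
      · exact ih k'' (i + 1) parts (by omega) (by omega)
      · rfl
      · exact ih k'' (i + 1) _ (by omega) (by omega)
      · rfl
    · rw [pvConsume_neg _ _ _ _ _ _ h, pvConsume_neg _ _ _ _ _ _ h]

lemma pvOuter_fuel (c ro : List String) (n : Nat) :
    ∀ (k k' i : Nat) (out : List String), n - i ≤ k → n - i ≤ k' →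
      pvOuter c ro n k i out = pvOuter c ro n k' i out := by
  intro k
  induction k with
  | zero =>
    intro k' i out hk hk'
    have h : ¬ i < n := by omega
    rw [pvOuter_neg _ _ _ _ _ _ h, pvOuter_neg _ _ _ _ _ _ h]
  | succ k ih =>
    intro k' i out hk hk'
    by_cases h : i < n
    · obtain ⟨k'', rfl⟩ : ∃ k'', k' = k'' + 1 := ⟨k' - 1, by omega⟩
      rw [pvOuter_pos _ _ _ _ _ _ h, pvOuter_pos _ _ _ _ _ _ h]
      split_ifs with h1
      · exact ih k'' (i + 1) out (by omega) (by omega)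
      · rw [pvConsume_fuel c ro n k k'' (i + 1) _ (by omega) (by omega)]
        have hj := pvConsume_ge c ro n k'' (i + 1)
          [PySem.Str.strip (c.getD i "")]
        exact ih k''
          (pvConsume c ro n k'' (i + 1) [PySem.Str.strip (c.getD i "")]).1 _
          (by omega) (by omega)
    · rw [pvOuter_neg _ _ _ _ _ _ h, pvOuter_neg _ _ _ _ _ _ h]

-- the main invariant, proved by strong induction on the remaining length n - i:
-- L1: A's fold from i with an empty pending group equals B's outer loop at i;
-- L2: A's fold from i with a nonempty pending group `cur` equals consuming the
--     group forward and resuming the outer loop at the returned index.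
lemma pv_main (conversation message_roles : List String) (n : Nat)
    (hn : n = conversation.length ⊓ message_roles.length) :
    ∀ (k i : Nat), n - i ≤ k →
      (∀ out, pvFinish ((PySem.List.enumerate ((conversation.zip message_roles).drop i) (i : Int)).foldl
          (pvStepA conversation message_roles) (out, [])) =
        pvOuter conversation message_roles n k i out)
      ∧ (∀ out cur, cur ≠ [] →
          pvFinish ((PySem.List.enumerate ((conversation.zip message_roles).drop i) (i : Int)).foldl
            (pvStepA conversation message_roles) (out, cur)) =
          pvOuter conversation message_roles n k
            (pvConsume conversation message_roles n k i cur).1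
            (out ++ [PySem.Str.join " " (pvConsume conversation message_roles n k i cur).2])) := by
  intro k
  induction k with
  | zero =>
    intro i hi
    have hin : ¬ i < n := by omega
    have hdrop : (conversation.zip message_roles).drop i = [] := by
      apply List.drop_eq_nil_of_le; simp [List.length_zip]; omega
    constructor
    · intro out
      simp [hdrop, pvFinish, pvOuter_neg _ _ _ _ _ _ hin]
    · intro out cur hcur
      simp [hdrop, pvFinish, hcur,
        pvConsume_neg _ _ _ _ _ _ hin, pvOuter_neg _ _ _ _ _ _ hin]
  | succ k ih =>
    intro i hi
    by_cases hin : i < n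
    · have hic : i < conversation.length := by omega
      have hir : i < message_roles.length := by omega
      have hiz : i < (conversation.zip message_roles).length := by simp [List.length_zip]; omega
      have hdrop : (conversation.zip message_roles).drop i =
          (conversation[i], message_roles[i]) :: (conversation.zip message_roles).drop (i + 1) := by
        rw [List.drop_eq_getElem_cons hiz, List.getElem_zip]
      have hcast : ((i : Int) + 1) = ((i + 1 : Nat) : Int) := by push_cast; ring
      have hgc : conversation.getD i "" = conversation[i] := List.getD_eq_getElem _ _ hic
      have hgr : message_roles.getD i "" = message_roles[i] := List.getD_eq_getElem _ _ hir
      have ih1 := (ih (i + 1) (by omega)).1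
      have ih2 := (ih (i + 1) (by omega)).2
      rw [hdrop]
      constructor
      · intro out
        rw [PySem.List.enumerate_cons, List.foldl_cons, hcast, pvOuter_pos _ _ _ _ _ _ hin, hgc, hgr]
        by_cases hsk : PySem.Str.strip conversation[i] = "" ∨ message_roles[i] = "unknown"
        · rw [stepA_skip _ _ _ _ _ _ hsk,
            if_pos (show PySem.Str.strip conversation[i] = "" ∨ message_roles[i] = "unknown" ∨ message_roles[i] ≠ "user" by tauto)]
          exact ih1 out
        · push Not at hsk
          by_cases hu : message_roles[i] = "user"
          · rw [if_neg (show ¬ (PySem.Str.strip conversation[i] = "" ∨ message_roles[i] = "unknown" ∨ message_roles[i] ≠ "user") by tauto),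
              stepA_user_nil _ _ _ _ _ _ hsk.1 hu]
            exact ih2 out [PySem.Str.strip conversation[i]] (by simp)
          · rw [stepA_sam _ _ _ _ _ _ hsk.1 hsk.2 hu,
              if_pos (show PySem.Str.strip conversation[i] = "" ∨ message_roles[i] = "unknown" ∨ message_roles[i] ≠ "user" by tauto)]
            simpa using ih1 out
      · intro out cur hcur
        rw [PySem.List.enumerate_cons, List.foldl_cons, hcast,
          pvConsume_pos _ _ _ _ _ _ hin, hgc, hgr]
        by_cases hsk : PySem.Str.strip conversation[i] = "" ∨ message_roles[i] = "unknown"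
        · rw [stepA_skip _ _ _ _ _ _ hsk, if_pos hsk]
          have hj := pvConsume_ge conversation message_roles n k (i + 1) cur
          rw [pvOuter_fuel _ _ _ (k + 1) k _ _ (by omega) (by omega)]
          exact ih2 out cur hcur
        · push Not at hsk
          rw [if_neg (show ¬ (PySem.Str.strip conversation[i] = "" ∨ message_roles[i] = "unknown") by tauto)]
          by_cases hu : message_roles[i] = "user"
          · rw [if_neg (show ¬ message_roles[i] ≠ "user" by simp [hu]),
              stepA_user _ _ _ _ _ _ hsk.1 hu]
            by_cases hg : pvGlue conversation message_roles i (PySem.Str.strip conversation[i]) = true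
            · rw [if_pos hg, if_pos hg]
              have hj := pvConsume_ge conversation message_roles n k (i + 1)
                (cur ++ [PySem.Str.strip conversation[i]])
              rw [pvOuter_fuel _ _ _ (k + 1) k _ _ (by omega) (by omega)]
              simpa using ih2 out (cur ++ [PySem.Str.strip conversation[i]]) (by simp)
            · rw [if_neg hg, if_neg hg,
                if_pos (show cur ≠ [] from hcur),
                pvOuter_pos _ _ _ _ _ _ hin, hgc, hgr,
                if_neg (show ¬ (PySem.Str.strip conversation[i] = "" ∨ message_roles[i] = "unknown" ∨ message_roles[i] ≠ "user") by tauto)]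
              exact ih2 (out ++ [PySem.Str.join " " cur]) [PySem.Str.strip conversation[i]] (by simp)
          · rw [stepA_sam _ _ _ _ _ _ hsk.1 hsk.2 hu,
              if_pos hu, if_pos (show cur ≠ [] from hcur),
              pvOuter_fuel _ _ _ (k + 1) k (i + 1) _ (by omega) (by omega)]
            exact ih1 (out ++ [PySem.Str.join " " cur])
    · have hdrop : (conversation.zip message_roles).drop i = [] := by
        apply List.drop_eq_nil_of_le; simp [List.length_zip]; omega
      constructor
      · intro out
        simp [hdrop, pvFinish, pvOuter_neg _ _ _ _ _ _ hin]
      · intro out cur hcur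
        simp [hdrop, pvFinish, hcur,
          pvConsume_neg _ _ _ _ _ _ hin, pvOuter_neg _ _ _ _ _ _ hin]

-- ===== VERDICT (by name: the statement is the Claim_ definition above) =====
theorem reconstruct_user_responses_py_spec : Claim_equal_reconstruct_user_responses_py := by
  intro conversation message_roles _
  unfold Spec_reconstruct_user_responses_py reconstruct_user_responses_py reconstruct_user_responses_py_alt
  have h := (pv_main conversation message_roles (conversation.length ⊓ message_roles.length) rfl
    (conversation.length ⊓ message_roles.length) 0 (by omega)).1 []
  simpa using h
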